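-- pv_equiv track=rewrite | github.com/snowjamai/code_tree | 250731/G or H 2/G-or-H-2.py | calc
-- ===== SOURCE A (Python) =====
-- def calc(arr):
--     if(( 'G' in arr) and ('H' not in arr)) or ( 'H' in arr) and ('G' not in arr):
--         return True
--
--     elif "G" in arr and 'H' in arr:
--         cnt_g = 0
--         cnt_h = 0
--         for i in arr:
--             if i == 'G':
--                 cnt_g += 1
--             elif i == 'H':
--                 cnt_h += 1
--         if cnt_g == cnt_h and cnt_g != 0:
--             return True
--     return False
-- ===== SOURCE B (Python) =====
-- def calc(arr):
--     g = 0
--     h = 0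
--     for i in arr:
--         if i == 'G':
--             g += 1
--         elif i == 'H':
--             h += 1
--     if g == 0 and h == 0:
--         return False
--     if g == 0 or h == 0:
--         return True
--     return g == h
-- ===== Notes on version B (the rewrite author's own statement) =====
-- stated objective: simpler
-- what changed: Replaced A's four membership scans plus a conditional counting pass by a single counting loop whose two counts alone decide the answer arithmetically.
import Mathlib
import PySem

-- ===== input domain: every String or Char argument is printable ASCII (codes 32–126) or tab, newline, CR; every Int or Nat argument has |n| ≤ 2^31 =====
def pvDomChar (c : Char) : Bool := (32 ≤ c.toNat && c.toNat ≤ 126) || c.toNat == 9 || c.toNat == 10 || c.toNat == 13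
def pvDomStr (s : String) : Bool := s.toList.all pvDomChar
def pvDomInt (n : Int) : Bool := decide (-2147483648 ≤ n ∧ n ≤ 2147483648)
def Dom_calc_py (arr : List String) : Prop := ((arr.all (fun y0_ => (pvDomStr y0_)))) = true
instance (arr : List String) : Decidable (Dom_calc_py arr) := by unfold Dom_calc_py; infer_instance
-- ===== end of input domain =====

-- B replaces A's membership checks plus conditional counting pass by a single counting pass whose two counts decide the answer (objective: simpler).


-- ===== PORT A =====
-- literal port of A: two membership-based branches, then a counting loop
def calc_py (arr : List String) : Bool :=
  if (arr.contains "G" && !arr.contains "H") || (arr.contains "H" && !arr.contains "G") then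
    true
  else if arr.contains "G" && arr.contains "H" then
    let p := arr.foldl
      (fun (p : Int × Int) i =>
        if i = "G" then (p.1 + 1, p.2)
        else if i = "H" then (p.1, p.2 + 1)
        else p) (0, 0)
    if p.1 = p.2 && p.1 ≠ 0 then true else false
  else false

-- ===== PORT B =====
-- port of B: one recursive counting pass, then a purely numeric decision
def countGH (arr : List String) : Int × Int :=
  match arr with
  | [] => (0, 0)
  | i :: t =>
    let p := countGH t
    if i = "G" then (p.1 + 1, p.2)
    else if i = "H" then (p.1, p.2 + 1)
    else p

def calc_py_alt (arr : List String) : Bool :=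
  let p := countGH arr
  if p.1 = 0 && p.2 = 0 then false
  else if p.1 = 0 || p.2 = 0 then true
  else decide (p.1 = p.2)

-- ===== PRECONDITION & SPEC =====
def Spec_calc_py (arr : List String) (out : Bool) : Prop := out = calc_py_alt arr
instance (arr : List String) (out : Bool) : Decidable (Spec_calc_py arr out) := by unfold Spec_calc_py; infer_instance

-- ===== CLAIM (what is proved, stated in full; the proofs are below) =====
def Claim_equal_calc_py : Prop := ∀ (arr : List String), Dom_calc_py arr → Spec_calc_py arr (calc_py arr)

-- ===== LEMMAS AND PROOFS =====

-- ===== VERDICT (by name: the statement is the Claim_ definition above) =====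
theorem foldGH_counts (arr : List String) (a b : Int) :
    arr.foldl
      (fun (p : Int × Int) i =>
        if i = "G" then (p.1 + 1, p.2)
        else if i = "H" then (p.1, p.2 + 1)
        else p) (a, b)
      = (a + (arr.count "G" : Int), b + (arr.count "H" : Int)) := by
  induction arr generalizing a b with
  | nil => simp
  | cons x t ih =>
    by_cases hg : x = "G"
    · subst hg; simp [List.foldl, ih]; ring
    · by_cases hh : x = "H"
      · subst hh
        simp [List.foldl, ih, hg]
        ring
      · simp [List.foldl, ih, hg, hh]

theorem countGH_counts (arr : List String) :
    countGH arr = ((arr.count "G" : Int), (arr.count "H" : Int)) := by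
  induction arr with
  | nil => simp [countGH]
  | cons x t ih =>
    by_cases hg : x = "G"
    · subst hg; simp [countGH, ih]
    · by_cases hh : x = "H"
      · subst hh; simp [countGH, ih, hg]
      · simp [countGH, ih, hg, hh]

theorem contains_iff_count_pos (arr : List String) (s : String) :
    arr.contains s = true ↔ 0 < arr.count s := by
  rw [List.contains_iff_mem]
  exact (List.count_pos_iff).symm

theorem calc_py_spec : Claim_equal_calc_py := by
  intro arr _
  unfold Spec_calc_py calc_py calc_py_alt
  rw [foldGH_counts, countGH_counts]
  have hG := contains_iff_count_pos arr "G"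
  have hH := contains_iff_count_pos arr "H"
  by_cases g : arr.contains "G" = true <;> by_cases h : arr.contains "H" = true
  · -- both present
    have h1 : (0:Int) < (arr.count "G" : Int) := by exact_mod_cast hG.mp g
    have h2 : (0:Int) < (arr.count "H" : Int) := by exact_mod_cast hH.mp h
    simp only [g, h]
    by_cases e : (arr.count "G" : Int) = (arr.count "H" : Int) <;> simp [e] <;> omega
  · -- only G
    have h1 : (0:Int) < (arr.count "G" : Int) := by exact_mod_cast hG.mp g
    have h2 : (arr.count "H" : Int) = 0 := by
      have := (not_iff_not.mpr hH).mp (by simpa using h)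
      exact_mod_cast Nat.eq_zero_of_not_pos this
    simp only [g, h]
    simp [h2]; omega
  · -- only H
    have h2 : (0:Int) < (arr.count "H" : Int) := by exact_mod_cast hH.mp h
    have h1 : (arr.count "G" : Int) = 0 := by
      have := (not_iff_not.mpr hG).mp (by simpa using g)
      exact_mod_cast Nat.eq_zero_of_not_pos this
    simp only [g, h]
    simp [h1]; omega
  · -- neither
    have h1 : (arr.count "G" : Int) = 0 := by
      have := (not_iff_not.mpr hG).mp (by simpa using g)
      exact_mod_cast Nat.eq_zero_of_not_pos this
    have h2 : (arr.count "H" : Int) = 0 := by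
      have := (not_iff_not.mpr hH).mp (by simpa using h)
      exact_mod_cast Nat.eq_zero_of_not_pos this
    simp only [g, h]
    simp [h1, h2]
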